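-- pv_equiv track=rewrite | github.com/Byeongsoo-Min/Algorithm-Python | 프로그래머스/3/12987. 숫자 게임/숫자 게임.py | solution
-- ===== SOURCE A (Python) =====
-- def solution(A, B):
--     A.sort()
--     B.sort()
--     answer = 0
--
--     i = j = 0
--     n = len(A)
--
--     while i < n and j < n:
--         if B[j] > A[i]:
--             answer += 1
--             i += 1
--             j += 1
--         else:
--             j += 1  # B가 이길 수 없으니 다음 B로
--
--     return answer
-- ===== SOURCE B (Python) =====
-- # Alternative algorithm: instead of any greedy scan, binary-search the answer.
-- # Sort both lists ascending in place (same mutation as A). Winning k games is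
-- # possible iff pairing B's k largest available cards (within B[:n], the only
-- # cards A's loop consults) against A's k smallest, in order, wins every pair;
-- # this feasibility is monotone in k, so the answer is the largest feasible k,
-- # found by binary search. Return-value equivalence only is claimed.
-- def solution(A, B):
--     A.sort()
--     B.sort()
--     n = len(A)
--     b = B[:n]
--
--     def feasible(k):
--         # pair B's k largest of b against A's k smallest, in order
--         return all(b[n - k + i] > A[i] for i in range(k))
--
--     lo, hi = 0, n
--     while lo < hi:
--         mid = (lo + hi + 1) // 2
--         if feasible(mid):
--             lo = mid
--         else:
--             hi = mid - 1
--     return lo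
-- ===== Notes on version B (the rewrite author's own statement) =====
-- stated objective: alternative
-- what changed: A counts wins by a linear greedy two-pointer scan over the sorted lists; B computes no matching at all: it binary-searches the largest k for which pairing B's k largest cards against A's k smallest is pointwise winning (a monotone feasibility predicate), which equals the greedy count by a matching-optimality argument.
import Mathlib
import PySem

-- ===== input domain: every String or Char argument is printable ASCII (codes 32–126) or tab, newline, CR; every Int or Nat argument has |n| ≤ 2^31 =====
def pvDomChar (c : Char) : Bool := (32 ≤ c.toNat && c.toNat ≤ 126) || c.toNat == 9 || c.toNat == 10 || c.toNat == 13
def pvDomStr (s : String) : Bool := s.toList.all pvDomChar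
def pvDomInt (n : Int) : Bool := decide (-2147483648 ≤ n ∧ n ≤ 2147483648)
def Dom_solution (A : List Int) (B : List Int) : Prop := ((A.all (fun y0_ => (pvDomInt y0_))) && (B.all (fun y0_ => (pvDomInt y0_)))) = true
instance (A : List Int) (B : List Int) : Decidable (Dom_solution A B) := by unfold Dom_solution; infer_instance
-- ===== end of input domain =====

-- B replaces A's linear greedy scan by a binary search for the largest k such that
-- B's k largest cards (within B[:len(A)]) pairwise beat A's k smallest; both Pythons
-- sort A and B in place (same mutation) and only the RETURN value is claimed equal.

-- ===== PORT A =====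
-- A's while loop: i, j forward pointers, bound n = len(A) on BOTH; B[j] may be out of
-- range when len(B) < len(A) (Python IndexError = the `none` match arm, excluded by Pre_).
def solLoopA (a b : List Int) (n i j : Nat) (answer : Int) : Int :=
  if _h : i < n ∧ j < n then
    match PySem.List.pyGet? b (j : Int), PySem.List.pyGet? a (i : Int) with
    | some bv, some av =>
        if bv > av then solLoopA a b n (i + 1) (j + 1) (answer + 1)
        else solLoopA a b n i (j + 1) answer
    | _, _ => 0
  else answer
termination_by n - j
decreasing_by all_goals omega

def solution (A : List Int) (B : List Int) : Int :=
  let a := PySem.List.sorted A (fun x => x)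
  let b := PySem.List.sorted B (fun x => x)
  solLoopA a b a.length 0 0 0

-- ===== PORT B =====
-- feasible(k) of Source B: all(b[n-k+i] > A[i] for i in range(k)); an out-of-range index is
-- a Python IndexError (the `none` match arm, reachable only outside Pre_).
def feasB (a b : List Int) (n k : Nat) : Bool :=
  (PySem.List.pyRange 0 (k : Int) 1).all fun i =>
    match PySem.List.pyGet? b ((n : Int) - (k : Int) + i), PySem.List.pyGet? a i with
    | some bv, some av => decide (bv > av)
    | _, _ => false

-- Source B's while loop: binary search for the largest feasible k in [lo, hi].
def bsearchB (a b : List Int) (n : Nat) (lo hi : Nat) : Nat :=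
  if _h : lo < hi then
    let mid := (lo + hi + 1) / 2
    if feasB a b n mid then bsearchB a b n mid hi
    else bsearchB a b n lo (mid - 1)
  else lo
termination_by hi - lo
decreasing_by all_goals omega

def solution_alt (A : List Int) (B : List Int) : Int :=
  let a := PySem.List.sorted A (fun x => x)
  let bs := PySem.List.sorted B (fun x => x)
  let n := A.length
  let b := PySem.List.slice bs none (some (n : Int))
  ((bsearchB a b n 0 n : Nat) : Int)

-- ===== PRECONDITION & SPEC =====
-- Pre_ is exactly A's return domain: when B is shorter than A, A's loop indexes B past
-- its end and raises IndexError.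
def Pre_solution (A : List Int) (B : List Int) : Prop := A.length ≤ B.length
instance (A : List Int) (B : List Int) : Decidable (Pre_solution A B) := by unfold Pre_solution; infer_instance
def pvWitness_solution : List Int × List Int := ([3, 1, 2], [2, 3, 1])

def Spec_solution (A : List Int) (B : List Int) (out : Int) : Prop := out = solution_alt A B
instance (A : List Int) (B : List Int) (out : Int) : Decidable (Spec_solution A B out) := by unfold Spec_solution; infer_instance

-- ===== CLAIM (what is proved, stated in full; the proofs are below) =====
def Claim_equal_solution : Prop := ∀ (A : List Int) (B : List Int), Dom_solution A B → Pre_solution A B → Spec_solution A B (solution A B)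

-- ===== LEMMAS AND PROOFS =====

-- A's greedy as a pure recursion on ascending lists.
def fAux : List Int → List Int → Int
  | a :: as, b :: bs => if b > a then 1 + fAux as bs else fAux (a :: as) bs
  | _, _ => 0
termination_by _ b => b.length

-- The top-down greedy on DESCENDING lists (proof-layer middleman between the two).
def gAux : List Int → List Int → Nat
  | a :: as, b :: bs => if b > a then 1 + gAux as bs else gAux as (b :: bs)
  | _, _ => 0
termination_by a _ => a.length

lemma fAux_nil_left (b : List Int) : fAux [] b = 0 := by cases b <;> simp [fAux]

lemma fAux_nil_right (a : List Int) : fAux a [] = 0 := by cases a <;> simp [fAux]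

lemma gAux_nil_left (b : List Int) : gAux [] b = 0 := by cases b <;> simp [gAux]

lemma gAux_nil_right (a : List Int) : gAux a [] = 0 := by cases a <;> simp [gAux]

lemma fAux_nonneg : ∀ (b a : List Int), 0 ≤ fAux a b := by
  intro b
  induction b with
  | nil => intro a; rw [fAux_nil_right]
  | cons c cs ih =>
    intro a
    cases a with
    | nil => rw [fAux_nil_left]
    | cons a0 as =>
      simp only [fAux]
      split
      · have := ih as; omega
      · exact ih (a0 :: as)

lemma fAux_le_len : ∀ (b a : List Int), fAux a b ≤ (a.length : Int) := by
  intro b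
  induction b with
  | nil => intro a; rw [fAux_nil_right]; positivity
  | cons c cs ih =>
    intro a
    cases a with
    | nil => simp [fAux_nil_left]
    | cons a0 as =>
      by_cases hc : c > a0
      · simp only [fAux, if_pos hc]
        have := ih as; simp only [List.length_cons]; push_cast; omega
      · simp only [fAux, if_neg hc]
        have := ih (a0 :: as); omega

lemma gAux_le_len : ∀ (a b : List Int), gAux a b ≤ a.length := by
  intro a
  induction a with
  | nil => intro b; rw [gAux_nil_left]; omega
  | cons x as ih =>
    intro b
    cases b with
    | nil => rw [gAux_nil_right]; omega
    | cons y bs =>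
      simp only [gAux]
      split
      · have := ih bs; simp only [List.length_cons]; omega
      · have := ih (y :: bs); simp only [List.length_cons]; omega

-- dropping the last (largest) card of A lowers the count by at most one
lemma fAux_snoc_le : ∀ (b as : List Int) (x : Int), fAux (as ++ [x]) b ≤ fAux as b + 1 := by
  intro b
  induction b with
  | nil => intro as x; rw [fAux_nil_right, fAux_nil_right]; omega
  | cons c cs ih =>
    intro as x
    cases as with
    | nil =>
      by_cases hc : c > x
      · simp only [List.nil_append, fAux, if_pos hc, fAux_nil_left]
        have := fAux_nonneg cs []
        rw [fAux_nil_left] at this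
        omega
      · simp only [List.nil_append, fAux, if_neg hc, fAux_nil_left]
        have := ih [] x
        simp only [List.nil_append, fAux_nil_left] at this
        omega
    | cons a0 as' =>
      by_cases hc : c > a0
      · simp only [List.cons_append, fAux, if_pos hc]
        have := ih as' x; omega
      · simp only [List.cons_append, fAux, if_neg hc]
        have := ih (a0 :: as') x
        simp only [List.cons_append] at this
        omega

-- if the count never needs A's last card, it can be removed
lemma fAux_snoc_eq : ∀ (b as : List Int) (x : Int),
    fAux (as ++ [x]) b ≤ (as.length : Int) → fAux (as ++ [x]) b = fAux as b := by
  intro b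
  induction b with
  | nil => intro as x _; rw [fAux_nil_right, fAux_nil_right]
  | cons c cs ih =>
    intro as x h
    cases as with
    | nil =>
      by_cases hc : c > x
      · simp only [List.nil_append, fAux, if_pos hc, fAux_nil_left] at h
        have := fAux_nonneg cs ([] : List Int)
        rw [fAux_nil_left] at this
        simp at h
      · simp only [List.nil_append, fAux, if_neg hc, fAux_nil_left] at h ⊢
        have := ih [] x (by simpa [fAux_nil_left] using h)
        simpa [fAux_nil_left] using this
    | cons a0 as' =>
      by_cases hc : c > a0
      · simp only [List.cons_append, fAux, if_pos hc] at h ⊢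
        have := ih as' x (by simp only [List.length_cons] at h; push_cast at h ⊢; omega)
        omega
      · simp only [List.cons_append, fAux, if_neg hc] at h ⊢
        exact ih (a0 :: as') x (by simpa [List.cons_append] using h)

-- if every card of b is at most x, A's last card x never wins and can be removed
lemma fAux_snoc_small : ∀ (b as : List Int) (x : Int),
    (∀ e ∈ b, e ≤ x) → fAux (as ++ [x]) b = fAux as b := by
  intro b
  induction b with
  | nil => intro as x _; rw [fAux_nil_right, fAux_nil_right]
  | cons c cs ih =>
    intro as x hb
    cases as with
    | nil =>
      have hcx : ¬ (c > x) := by have := hb c (by simp); omega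
      simp only [List.nil_append, fAux, if_neg hcx, fAux_nil_left]
      have := ih [] x (fun e he => hb e (by simp [he]))
      simpa [fAux_nil_left] using this
    | cons a0 as' =>
      by_cases hc : c > a0
      · simp only [List.cons_append, fAux, if_pos hc]
        rw [ih as' x (fun e he => hb e (by simp [he]))]
      · simp only [List.cons_append, fAux, if_neg hc]
        have := ih (a0 :: as') x (fun e he => hb e (by simp [he]))
        simpa [List.cons_append] using this

-- appending a card to b never lowers the count
lemma fAux_app_mono : ∀ (b a : List Int) (y : Int), fAux a b ≤ fAux a (b ++ [y]) := by
  intro b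
  induction b with
  | nil => intro a y; rw [fAux_nil_right]; exact fAux_nonneg [y] a
  | cons c cs ih =>
    intro a y
    cases a with
    | nil => rw [fAux_nil_left, fAux_nil_left]
    | cons a0 as =>
      by_cases hc : c > a0
      · simp only [List.cons_append, fAux, if_pos hc]
        have := ih as y; omega
      · simp only [List.cons_append, fAux, if_neg hc]
        exact ih (a0 :: as) y

-- appending a card beating all of a wins one more game when a is not exhausted
lemma fAux_app_big : ∀ (b a : List Int) (y : Int),
    (∀ e ∈ a, e < y) → fAux a b < (a.length : Int) → fAux a (b ++ [y]) = fAux a b + 1 := by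
  intro b
  induction b with
  | nil =>
    intro a y ha h
    cases a with
    | nil => rw [fAux_nil_left] at h; simp at h
    | cons a0 as =>
      have hy : y > a0 := by have := ha a0 (by simp); omega
      simp only [List.nil_append, fAux, if_pos hy, fAux_nil_right]
      omega
  | cons c cs ih =>
    intro a y ha h
    cases a with
    | nil => rw [fAux_nil_left] at h; simp at h
    | cons a0 as =>
      by_cases hc : c > a0
      · simp only [List.cons_append, fAux, if_pos hc] at h ⊢
        have := ih as y (fun e he => ha e (by simp [he]))
          (by simp only [List.length_cons] at h; push_cast at h ⊢; omega)
        omega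
      · simp only [List.cons_append, fAux, if_neg hc] at h ⊢
        exact ih (a0 :: as) y ha h

-- on sorted input the bottom-up and the top-down greedy agree.
-- ra, rb are the DESCENDING lists; their reverses are the ascending ones A's scan reads.
lemma fAux_eq_gAux : ∀ (ra rb : List Int),
    ra.Pairwise (fun p q => q ≤ p) → rb.Pairwise (fun p q => q ≤ p) →
    fAux ra.reverse rb.reverse = (gAux ra rb : Int) := by
  intro ra
  induction ra with
  | nil => intro rb _ _; simp only [List.reverse_nil]; rw [fAux_nil_left, gAux_nil_left]; rfl
  | cons x ras ih =>
    intro rb ha hb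
    cases rb with
    | nil => simp only [List.reverse_nil]; rw [fAux_nil_right, gAux_nil_right]; rfl
    | cons y rbs =>
      have hax : ∀ e ∈ ras, e ≤ x := (List.pairwise_cons.mp ha).1
      have ha' := (List.pairwise_cons.mp ha).2
      have hby : ∀ e ∈ rbs, e ≤ y := (List.pairwise_cons.mp hb).1
      have hb' := (List.pairwise_cons.mp hb).2
      simp only [List.reverse_cons, gAux]
      by_cases hxy : y > x
      · rw [if_pos hxy]
        have hbig : ∀ e ∈ ras.reverse ++ [x], e < y := by
          intro e he
          rcases List.mem_append.mp he with h1 | h1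
          · have := hax e (List.mem_reverse.mp h1); omega
          · simp at h1; omega
        by_cases hc : fAux (ras.reverse ++ [x]) rbs.reverse ≤ (ras.length : Int)
        · have h6 := fAux_app_big rbs.reverse (ras.reverse ++ [x]) y hbig
            (by have : ((ras.reverse ++ [x]).length : Int) = (ras.length : Int) + 1 := by simp
                omega)
          rw [h6, fAux_snoc_eq rbs.reverse ras.reverse x
            (by simp only [List.length_reverse]; exact hc)]
          rw [ih rbs ha' hb']
          push_cast
          omega
        · push Not at hc
          have hle := fAux_le_len rbs.reverse (ras.reverse ++ [x])
          simp only [List.length_append, List.length_reverse, List.length_cons,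
            List.length_nil] at hle
          have heq : fAux (ras.reverse ++ [x]) rbs.reverse = (ras.length : Int) + 1 := by
            push_cast at hle ⊢; omega
          have h3 := fAux_snoc_le rbs.reverse ras.reverse x
          have h2 := fAux_le_len rbs.reverse ras.reverse
          simp only [List.length_reverse] at h2
          have heq2 : fAux ras.reverse rbs.reverse = (ras.length : Int) := by omega
          have h5 := fAux_app_mono rbs.reverse (ras.reverse ++ [x]) y
          have h7 := fAux_le_len (rbs.reverse ++ [y]) (ras.reverse ++ [x])
          simp only [List.length_append, List.length_reverse, List.length_cons,
            List.length_nil] at h7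
          have h8 := ih rbs ha' hb'
          rw [heq2] at h8
          have h9 := gAux_le_len ras rbs
          push_cast at h7 ⊢
          omega
      · rw [if_neg hxy]
        have hsmall : ∀ e ∈ rbs.reverse ++ [y], e ≤ x := by
          intro e he
          rcases List.mem_append.mp he with h1 | h1
          · have := hby e (List.mem_reverse.mp h1); omega
          · simp at h1; omega
        rw [fAux_snoc_small (rbs.reverse ++ [y]) ras.reverse x hsmall]
        have := ih (y :: rbs) ha' hb
        simpa [List.reverse_cons] using this

-- ON DESCENDING LISTS: the greedy count is feasible — B's g largest cards pairwise
-- beat A's g smallest (both blocks read in descending order).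
lemma gAux_feas : ∀ (ra rb : List Int),
    ra.Pairwise (fun p q => q ≤ p) → rb.Pairwise (fun p q => q ≤ p) →
    List.Forall₂ (fun p q => p < q) (ra.drop (ra.length - gAux ra rb)) (rb.take (gAux ra rb)) := by
  intro ra
  induction ra with
  | nil =>
    intro rb _ _
    rw [gAux_nil_left]
    simp
  | cons x ras ih =>
    intro rb ha hb
    cases rb with
    | nil =>
      rw [gAux_nil_right]
      simp
    | cons y rbs =>
      have hax : ∀ e ∈ ras, e ≤ x := (List.pairwise_cons.mp ha).1
      have ha' := (List.pairwise_cons.mp ha).2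
      have hb' := (List.pairwise_cons.mp hb).2
      simp only [gAux]
      by_cases hxy : y > x
      · rw [if_pos hxy]
        have hg := ih rbs ha' hb'
        have hgl := gAux_le_len ras rbs
        set g := gAux ras rbs with hgdef
        have hlen : (x :: ras).length - (1 + g) = ras.length - g := by
          simp only [List.length_cons]; omega
        rw [hlen]
        have htake : (y :: rbs).take (1 + g) = y :: rbs.take g := by
          rw [show 1 + g = g + 1 from by omega]; rfl
        rw [htake]
        rcases Nat.eq_or_lt_of_le hgl with heq | hlt
        · have hd : (x :: ras).drop (ras.length - g) = x :: ras := by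
            rw [show ras.length - g = 0 from by omega]; rfl
          rw [hd]
          refine List.Forall₂.cons hxy ?_
          rw [show ras.length - g = 0 from by omega] at hg
          simpa using hg
        · have hm : ras.length - g - 1 < ras.length := by omega
          have hd : (x :: ras).drop (ras.length - g)
              = ras.drop (ras.length - g - 1) := by
            rw [show ras.length - g = (ras.length - g - 1) + 1 from by omega]
            rfl
          rw [hd, List.drop_eq_getElem_cons hm]
          refine List.Forall₂.cons ?_ ?_
          · have : ras[ras.length - g - 1] ≤ x := hax _ (List.getElem_mem hm)
            omega
          · rw [show ras.length - g - 1 + 1 = ras.length - g from by omega]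
            exact hg
      · rw [if_neg hxy]
        have hg := ih (y :: rbs) ha' hb
        have hgl := gAux_le_len ras (y :: rbs)
        set g := gAux ras (y :: rbs) with hgdef
        have hd : (x :: ras).drop ((x :: ras).length - g) = ras.drop (ras.length - g) := by
          simp only [List.length_cons]
          rw [show ras.length + 1 - g = (ras.length - g) + 1 from by omega]
          rfl
        rw [hd]
        exact hg

-- ON DESCENDING LISTS: any feasible k is at most the greedy count.
lemma gAux_max : ∀ (ra rb : List Int) (k : Nat), k ≤ ra.length →
    List.Forall₂ (fun p q => p < q) (ra.drop (ra.length - k)) (rb.take k) →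
    k ≤ gAux ra rb := by
  intro ra
  induction ra with
  | nil =>
    intro rb k hk _
    simp only [List.length_nil] at hk
    omega
  | cons x ras ih =>
    intro rb k hk hf
    simp only [List.length_cons] at hk
    cases Nat.eq_zero_or_pos k with
    | inl h0 => omega
    | inr hpos =>
      cases rb with
      | nil =>
        exfalso
        simp only [List.take_nil] at hf
        have := List.Forall₂.length_eq hf
        simp only [List.length_drop, List.length_nil, List.length_cons] at this
        omega
      | cons y rbs =>
        simp only [gAux]
        have htake : (y :: rbs).take k = y :: rbs.take (k - 1) := by
          rw [show k = (k - 1) + 1 from by omega]; rfl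
        rw [htake] at hf
        by_cases hxy : y > x
        · rw [if_pos hxy]
          rcases Nat.eq_or_lt_of_le hk with heq | hlt
          · -- k = |ra| : the head pair is (x, y)
            have hd : (x :: ras).drop ((x :: ras).length - k) = x :: ras := by
              rw [show (x :: ras).length - k = 0 from by
                simp only [List.length_cons]; omega]
              rfl
            rw [hd] at hf
            rcases hf with _ | ⟨_, htl⟩
            have hdr : ras.drop (ras.length - (k - 1)) = ras := by
              rw [show ras.length - (k - 1) = 0 from by omega]
              exact List.drop_zero
            have := ih rbs (k - 1) (by omega) (by rw [hdr]; exact htl)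
            omega
          · -- k < |ra| : the head of the dropped block is inside ras
            have hm : ras.length - k < ras.length := by omega
            have hd : (x :: ras).drop ((x :: ras).length - k)
                = ras.drop (ras.length - k) := by
              simp only [List.length_cons]
              rw [show ras.length + 1 - k = (ras.length - k) + 1 from by omega]; rfl
            rw [hd, List.drop_eq_getElem_cons hm] at hf
            rcases hf with _ | ⟨_, htl⟩
            have := ih rbs (k - 1) (by omega)
              (by rw [show ras.length - (k - 1) = ras.length - k + 1 from by omega]
                  exact htl)
            omega
        · rw [if_neg hxy]
          rcases Nat.eq_or_lt_of_le hk with heq | hlt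
          · -- k = |ra| would force x < y, contradiction
            exfalso
            have hd : (x :: ras).drop ((x :: ras).length - k) = x :: ras := by
              rw [show (x :: ras).length - k = 0 from by
                simp only [List.length_cons]; omega]
              rfl
            rw [hd] at hf
            rcases hf with _ | ⟨hhd, _⟩
            omega
          · have hd : (x :: ras).drop ((x :: ras).length - k)
                = ras.drop (ras.length - k) := by
              simp only [List.length_cons]
              rw [show ras.length + 1 - k = (ras.length - k) + 1 from by omega]; rfl
            rw [hd, ← htake] at hf
            exact ih (y :: rbs) k (by omega) hf

-- Forall₂ through lengths and positional reads (helper for the index bridges).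
lemma forall₂_iff_getD (l1 l2 : List Int) :
    List.Forall₂ (fun p q => p < q) l1 l2 ↔
      l1.length = l2.length ∧ ∀ i, i < l1.length → l1.getD i 0 < l2.getD i 0 := by
  rw [List.forall₂_iff_get]
  constructor
  · rintro ⟨hlen, h⟩
    refine ⟨hlen, fun i hi => ?_⟩
    have := h i hi (hlen ▸ hi)
    rwa [List.getD_eq_getElem l1 0 hi, List.getD_eq_getElem l2 0 (hlen ▸ hi)]
  · rintro ⟨hlen, h⟩
    refine ⟨hlen, fun i h1 h2 => ?_⟩
    have := h i h1
    rwa [List.getD_eq_getElem l1 0 h1, List.getD_eq_getElem l2 0 h2] at this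
  
-- The descending-lists feasibility statement, re-read positionally on the ASCENDING
-- lists a, b (of common length n): a[i] < b[n-k+i] for all i < k.
lemma forall₂_rev_iff_idx (a b : List Int) (n k : Nat)
    (han : a.length = n) (hbn : b.length = n) (hk : k ≤ n) :
    List.Forall₂ (fun p q => p < q) (a.reverse.drop (n - k)) (b.reverse.take k) ↔
      ∀ i, i < k → a.getD i 0 < b.getD (n - k + i) 0 := by
  rw [forall₂_iff_getD]
  have hl1 : (a.reverse.drop (n - k)).length = k := by
    simp [List.length_drop, han]; omega
  have hl2 : (b.reverse.take k).length = k := by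
    simp [List.length_take, hbn]; omega
  constructor
  · rintro ⟨_, h⟩ i hi
    have := h (k - 1 - i) (by omega)
    have e1 : (a.reverse.drop (n - k)).getD (k - 1 - i) 0 = a.getD i 0 := by
      have hidx : n - k + (k - 1 - i) < a.reverse.length := by simp [han]; omega
      rw [List.getD_eq_getElem _ 0 (by rw [hl1]; omega), List.getElem_drop,
        List.getElem_reverse, List.getD_eq_getElem _ 0 (by omega)]
      congr 1
      simp only [han]
      omega
    have e2 : (b.reverse.take k).getD (k - 1 - i) 0 = b.getD (n - k + i) 0 := by
      rw [List.getD_eq_getElem _ 0 (by rw [hl2]; omega), List.getElem_take,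
        List.getElem_reverse, List.getD_eq_getElem _ 0 (by omega)]
      congr 1
      simp only [hbn]
      omega
    rw [e1, e2] at this
    exact this
  · intro h
    refine ⟨by omega, fun i hi => ?_⟩
    rw [hl1] at hi
    have e1 : (a.reverse.drop (n - k)).getD i 0 = a.getD (k - 1 - i) 0 := by
      rw [List.getD_eq_getElem _ 0 (by rw [hl1]; omega), List.getElem_drop,
        List.getElem_reverse, List.getD_eq_getElem _ 0 (by rw [han]; omega)]
      congr 1
      simp only [han]
      omega
    have e2 : (b.reverse.take k).getD i 0 = b.getD (n - 1 - i) 0 := by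
      rw [List.getD_eq_getElem _ 0 (by rw [hl2]; omega), List.getElem_take,
        List.getElem_reverse, List.getD_eq_getElem _ 0 (by rw [hbn]; omega)]
      congr 1
      simp only [hbn]
    rw [e1, e2]
    have h2 := h (k - 1 - i) (by omega)
    rwa [show n - k + (k - 1 - i) = n - 1 - i from by omega] at h2

-- The port's feasB, read positionally (on lists of common length n, k ≤ n).
lemma feasB_iff_idx (a b : List Int) (n k : Nat)
    (han : a.length = n) (hbn : b.length = n) (hk : k ≤ n) :
    feasB a b n k = true ↔ ∀ i, i < k → a.getD i 0 < b.getD (n - k + i) 0 := by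
  unfold feasB
  rw [PySem.List.pyRange_one, List.all_map, List.all_eq_true]
  simp only [Function.comp_apply, List.mem_range, Int.sub_zero, Int.toNat_natCast, zero_add]
  constructor
  · intro h i hi
    have := h i (by omega)
    rw [show (n : Int) - (k : Int) + ((i : Nat) : Int) = (((n - k + i : Nat) : Nat) : Int)
      from by push_cast; omega] at this
    rw [PySem.List.pyGet?_natCast, PySem.List.pyGet?_natCast] at this
    rw [List.getElem?_eq_getElem (l := b) (by omega),
        List.getElem?_eq_getElem (l := a) (by omega)] at this
    simp only [decide_eq_true_eq] at this
    rw [List.getD_eq_getElem a 0 (by omega), List.getD_eq_getElem b 0 (by omega)]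
    exact this
  · intro h i hi
    rw [show (n : Int) - (k : Int) + ((i : Nat) : Int) = (((n - k + i : Nat) : Nat) : Int)
      from by push_cast; omega]
    rw [PySem.List.pyGet?_natCast, PySem.List.pyGet?_natCast]
    rw [List.getElem?_eq_getElem (l := b) (by omega),
        List.getElem?_eq_getElem (l := a) (by omega)]
    simp only [decide_eq_true_eq]
    have := h i hi
    rwa [List.getD_eq_getElem a 0 (by omega), List.getD_eq_getElem b 0 (by omega)] at this

-- feasibility is monotone downward (b ascending): fewer games only get easier.
lemma feasB_mono (a b : List Int) (n : Nat)
    (han : a.length = n) (hbn : b.length = n)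
    (hb : b.Pairwise (fun p q => p ≤ q)) :
    ∀ j k, j ≤ k → k ≤ n → feasB a b n k = true → feasB a b n j = true := by
  intro j k hjk hkn hf
  rw [feasB_iff_idx a b n k han hbn hkn] at hf
  rw [feasB_iff_idx a b n j han hbn (by omega)]
  intro i hi
  have h1 := hf i (by omega)
  have hle : b.getD (n - k + i) 0 ≤ b.getD (n - j + i) 0 := by
    rcases Nat.eq_or_lt_of_le (show n - k + i ≤ n - j + i from by omega) with he | hlt
    · rw [he]
    · have hp := List.pairwise_iff_getElem.mp hb (n - k + i) (n - j + i)
        (by omega) (by omega) hlt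
      rwa [List.getD_eq_getElem b 0 (by omega), List.getD_eq_getElem b 0 (by omega)]
  omega

-- the binary search finds g, the largest feasible k in [0, n]
lemma bsearchB_eq (a b : List Int) (n g : Nat)
    (Hmono : ∀ j k, j ≤ k → k ≤ n → feasB a b n k = true → feasB a b n j = true)
    (Hg : feasB a b n g = true)
    (Hmax : ∀ k, k ≤ n → feasB a b n k = true → k ≤ g) :
    ∀ (m lo hi : Nat), hi - lo ≤ m → lo ≤ g → g ≤ hi → hi ≤ n →
      bsearchB a b n lo hi = g := by
  intro m
  induction m with
  | zero =>
    intro lo hi hm h1 h2 _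
    rw [bsearchB, dif_neg (by omega)]
    omega
  | succ m ih =>
    intro lo hi hm h1 h2 h3
    rw [bsearchB]
    by_cases hlt : lo < hi
    · rw [dif_pos hlt]
      simp only
      set mid := (lo + hi + 1) / 2 with hmid
      have hmid1 : lo < mid := by omega
      have hmid2 : mid ≤ hi := by omega
      by_cases hf : feasB a b n mid
      · rw [if_pos hf]
        have hmg : mid ≤ g := Hmax mid (by omega) hf
        exact ih mid hi (by omega) hmg h2 h3
      · rw [if_neg hf]
        have hgm : g ≤ mid - 1 := by
          by_contra hc
          exact hf (Hmono mid g (by omega) (by omega) Hg)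
        exact ih lo (mid - 1) (by omega) h1 hgm (by omega)
    · rw [dif_neg hlt]
      omega

-- Bridge for A's loop: with n = |a| ≤ |b|, the loop from (i, j) computes
-- answer + fAux (a from i) (first n of b, from j).
lemma loopA_bridge (a b : List Int) (hab : a.length ≤ b.length) :
    ∀ (k i j : Nat) (answer : Int), a.length ≤ j + k →
    solLoopA a b a.length i j answer
      = answer + fAux (a.drop i) ((b.take a.length).drop j) := by
  intro k
  induction k with
  | zero =>
    intro i j answer hk
    rw [solLoopA, dif_neg (by omega)]
    rw [show (b.take a.length).drop j = [] from
      List.drop_eq_nil_of_le (by simp [List.length_take]; omega), fAux_nil_right]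
    omega
  | succ k ih =>
    intro i j answer hk
    rw [solLoopA]
    by_cases h : i < a.length ∧ j < a.length
    · rw [dif_pos h]
      obtain ⟨hi, hj⟩ := h
      have hjb : j < b.length := by omega
      rw [PySem.List.pyGet?_natCast b j, PySem.List.pyGet?_natCast a i,
        List.getElem?_eq_getElem hjb, List.getElem?_eq_getElem hi]
      simp only
      have hda : a.drop i = a[i] :: a.drop (i + 1) := List.drop_eq_getElem_cons hi
      have hjt : j < (b.take a.length).length := by simp [List.length_take]; omega
      have hdb : (b.take a.length).drop j
          = (b.take a.length)[j] :: (b.take a.length).drop (j + 1) :=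
        List.drop_eq_getElem_cons hjt
      have hbt : (b.take a.length)[j] = b[j] := List.getElem_take
      rw [hda, hdb, hbt]
      simp only [fAux]
      split <;> rename_i hc
      · rw [ih (i + 1) (j + 1) (answer + 1) (by omega)]
        omega
      · rw [ih i (j + 1) answer (by omega), ← hda]
    · rw [dif_neg h]
      push Not at h
      by_cases hi : i < a.length
      · rw [show (b.take a.length).drop j = [] from
          List.drop_eq_nil_of_le (by simp [List.length_take]; omega), fAux_nil_right]
        omega
      · rw [show a.drop i = [] from List.drop_eq_nil_of_le (by omega), fAux_nil_left]
        omega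

-- A computes fAux over sorted A and the first |A| cards of sorted B
lemma solution_eq_fAux (A B : List Int) (h : A.length ≤ B.length) :
    solution A B
      = fAux (PySem.List.sorted A (fun x => x))
          ((PySem.List.sorted B (fun x => x)).take A.length) := by
  unfold solution
  have hlen : (PySem.List.sorted A (fun x => x)).length
      ≤ (PySem.List.sorted B (fun x => x)).length := by
    rw [PySem.List.length_sorted, PySem.List.length_sorted]; exact h
  rw [loopA_bridge _ _ hlen (PySem.List.sorted A (fun x => x)).length 0 0 0 (by omega)]
  simp [PySem.List.length_sorted]

-- B's binary search lands exactly on the top-down greedy count of the reversed lists.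
lemma solution_alt_eq_gAux (A B : List Int) (h : A.length ≤ B.length) :
    solution_alt A B
      = (gAux (PySem.List.sorted A (fun x => x)).reverse
          ((PySem.List.sorted B (fun x => x)).take A.length).reverse : Int) := by
  unfold solution_alt
  simp only [PySem.List.slice_to_natCast]
  set sa := PySem.List.sorted A (fun x => x) with hsa
  set tb := (PySem.List.sorted B (fun x => x)).take A.length with htb
  set n := A.length with hn
  have hlsa : sa.length = n := by rw [hsa, PySem.List.length_sorted]
  have hltb : tb.length = n := by
    rw [htb, List.length_take, PySem.List.length_sorted]; omega
  have hpa : sa.Pairwise (fun p q => p ≤ q) := PySem.List.sorted_pairwise A (fun x => x)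
  have hpb : tb.Pairwise (fun p q => p ≤ q) :=
    List.Pairwise.sublist (List.take_sublist _ _) (PySem.List.sorted_pairwise B (fun x => x))
  have hra : sa.reverse.Pairwise (fun p q => q ≤ p) := List.pairwise_reverse.mpr hpa
  have hrb : tb.reverse.Pairwise (fun p q => q ≤ p) := List.pairwise_reverse.mpr hpb
  set g := gAux sa.reverse tb.reverse with hg
  have hgn : g ≤ n := by
    have := gAux_le_len sa.reverse tb.reverse
    simpa [hlsa] using this
  have hfeasg : feasB sa tb n g = true := by
    rw [feasB_iff_idx sa tb n g hlsa hltb hgn]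
    rw [← forall₂_rev_iff_idx sa tb n g hlsa hltb hgn]
    have := gAux_feas sa.reverse tb.reverse hra hrb
    rwa [List.length_reverse, hlsa] at this
  have hmaxg : ∀ k, k ≤ n → feasB sa tb n k = true → k ≤ g := by
    intro k hk hf
    rw [feasB_iff_idx sa tb n k hlsa hltb hk] at hf
    rw [← forall₂_rev_iff_idx sa tb n k hlsa hltb hk] at hf
    refine gAux_max sa.reverse tb.reverse k ?_ ?_
    · rw [List.length_reverse, hlsa]; exact hk
    · rwa [List.length_reverse, hlsa]
  have := bsearchB_eq sa tb n g
    (feasB_mono sa tb n hlsa hltb hpb) hfeasg hmaxg n 0 n (by omega) (by omega) hgn (le_refl n)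
  rw [this]

-- ===== VERDICT (by name: the statement is the Claim_ definition above) =====
theorem solution_spec : Claim_equal_solution := by
  intro A B _ hpre
  unfold Spec_solution
  unfold Pre_solution at hpre
  rw [solution_eq_fAux A B hpre, solution_alt_eq_gAux A B hpre]
  set sa := PySem.List.sorted A (fun x => x) with hsa
  set tb := (PySem.List.sorted B (fun x => x)).take A.length with htb
  have hpa : sa.Pairwise (fun p q => p ≤ q) := PySem.List.sorted_pairwise A (fun x => x)
  have hpb : tb.Pairwise (fun p q => p ≤ q) :=
    List.Pairwise.sublist (List.take_sublist _ _) (PySem.List.sorted_pairwise B (fun x => x))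
  have := fAux_eq_gAux sa.reverse tb.reverse
    (List.pairwise_reverse.mpr hpa) (List.pairwise_reverse.mpr hpb)
  simpa using this
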